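-- pv_equiv track=rewrite | github.com/chenfyACAD/COMS3200 | a1c_repmark/repmarkclient.py | bytes_to_int
-- ===== SOURCE A (Python) =====
-- PAYLOAD_SIZE = 1464
--
-- def bytes_to_int(string, pad=PAYLOAD_SIZE):
--     try:
--         b_str = string.encode("UTF-8")
--     except:
--         b_str = string
--     if pad is not None:
--         for i in range(len(string), pad):
--             b_str += b'\0'
--     return int.from_bytes(b_str, byteorder='big')
-- ===== SOURCE B (Python) =====
-- PAYLOAD_SIZE = 1464
--
-- def bytes_to_int(string, pad=PAYLOAD_SIZE):
--     try:
--         b_str = string.encode("UTF-8")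
--     except:
--         b_str = string
--     value = int.from_bytes(b_str, byteorder='big')
--     if pad is not None and pad > len(string):
--         value <<= 8 * (pad - len(string))
--     return value
-- ===== Notes on version B (the rewrite author's own statement) =====
-- stated objective: simpler
-- what changed: B converts the raw bytes to an integer first and replaces A's byte-appending loop with a single left shift, since appending k zero bytes in big-endian equals multiplying by 256^k.
import Mathlib
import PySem

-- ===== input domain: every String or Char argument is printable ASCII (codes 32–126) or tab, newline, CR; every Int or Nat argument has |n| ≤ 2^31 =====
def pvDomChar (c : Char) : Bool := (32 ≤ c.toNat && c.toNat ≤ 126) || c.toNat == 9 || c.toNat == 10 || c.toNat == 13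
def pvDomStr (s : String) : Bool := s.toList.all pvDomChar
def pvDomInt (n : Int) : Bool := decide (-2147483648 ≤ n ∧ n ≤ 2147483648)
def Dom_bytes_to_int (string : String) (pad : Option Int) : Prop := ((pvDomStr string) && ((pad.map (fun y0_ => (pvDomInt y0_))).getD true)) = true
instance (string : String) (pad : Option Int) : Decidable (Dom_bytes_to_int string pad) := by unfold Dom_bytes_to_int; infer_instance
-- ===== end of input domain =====

-- B replaces A's zero-byte-appending loop with a single multiplication by 256^k (simpler); return value only.
-- ===== PORT A =====
-- On the ASCII domain, str.encode("UTF-8") is the list of character codes (exact on Dom).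
def bytes_to_int (string : String) (pad : Option Int) : Int :=
  let b_str0 : List Int := string.toList.map (fun c => (c.toNat : Int))
  let b_str : List Int :=
    match pad with
    | none => b_str0
    | some p =>
        (PySem.List.pyRange (string.toList.length : Int) p 1).foldl
          (fun acc _ => acc ++ [(0 : Int)]) b_str0
  b_str.foldl (fun acc b => acc * 256 + b) 0

-- ===== PORT B =====
def bytes_to_int_alt (string : String) (pad : Option Int) : Int :=
  let n : Int := (string.toList.length : Int)
  let value : Int := string.toList.foldl (fun acc c => acc * 256 + (c.toNat : Int)) 0
  match pad with
  | none => value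
  | some p => if p > n then value * 2 ^ (8 * (p - n)).toNat else value

-- ===== PRECONDITION & SPEC =====
def Spec_bytes_to_int (string : String) (pad : Option Int) (out : Int) : Prop := out = bytes_to_int_alt string pad
instance (string : String) (pad : Option Int) (out : Int) : Decidable (Spec_bytes_to_int string pad out) := by unfold Spec_bytes_to_int; infer_instance

-- ===== CLAIM (what is proved, stated in full; the proofs are below) =====
def Claim_equal_bytes_to_int : Prop := ∀ (string : String) (pad : Option Int), Dom_bytes_to_int string pad → Spec_bytes_to_int string pad (bytes_to_int string pad)

-- ===== LEMMAS AND PROOFS =====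

-- A's padding loop appends one zero byte per range element.
theorem foldl_append_zero {α : Type} (l : List α) (b0 : List Int) :
    l.foldl (fun acc _ => acc ++ [(0 : Int)]) b0 = b0 ++ List.replicate l.length 0 := by
  induction l generalizing b0 with
  | nil => simp
  | cons x xs ih =>
      rw [List.foldl_cons, ih, List.append_assoc]
      congr 1

-- Big-endian folding over k trailing zero bytes multiplies the accumulator by 256^k.
theorem foldl_be_replicate (k : Nat) (v : Int) :
    (List.replicate k (0 : Int)).foldl (fun acc b => acc * 256 + b) v = v * 256 ^ k := by
  induction k generalizing v with
  | zero => simp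
  | succ n ih =>
      simp [List.replicate_succ, List.foldl_cons, ih, pow_succ]
      ring

theorem bytes_to_int_eq (string : String) (pad : Option Int) :
    bytes_to_int string pad = bytes_to_int_alt string pad := by
  unfold bytes_to_int bytes_to_int_alt
  have hmap : (string.toList.map (fun c => (c.toNat : Int))).foldl
      (fun acc b => acc * 256 + b) 0
      = string.toList.foldl (fun acc c => acc * 256 + (c.toNat : Int)) 0 := by
    rw [List.foldl_map]
  cases pad with
  | none => exact hmap
  | some p =>
      show ((PySem.List.pyRange (string.toList.length : Int) p 1).foldl
          (fun acc _ => acc ++ [(0 : Int)])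
          (string.toList.map (fun c => (c.toNat : Int)))).foldl
          (fun acc b => acc * 256 + b) 0 = _
      rw [foldl_append_zero, List.foldl_append, PySem.List.length_pyRange_one,
          foldl_be_replicate, hmap]
      dsimp only
      by_cases hp : p > (string.toList.length : Int)
      · rw [if_pos hp]
        have h8 : (8 * (p - (string.toList.length : Int))).toNat
            = 8 * (p - (string.toList.length : Int)).toNat := by omega
        rw [h8, pow_mul]
        norm_num
      · rw [if_neg hp]
        have h0 : (p - (string.toList.length : Int)).toNat = 0 := by omega
        rw [h0, pow_zero, mul_one]

-- ===== VERDICT (by name: the statement is the Claim_ definition above) =====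
theorem bytes_to_int_spec : Claim_equal_bytes_to_int := by
  intro string pad _
  unfold Spec_bytes_to_int
  exact bytes_to_int_eq string pad
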